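-- pv_equiv track=rewrite | github.com/zweatshirt/pdf-to-excel | main.py | get_shift_type
-- ===== SOURCE A (Python) =====
-- def get_shift_type(ppl):
--     days = []
--     mids = []
--     nights = []
--     for n in range(0, len(ppl)):
--         if ppl[n][2] == 'Days':
--             days += ppl[n]
--         elif ppl[n][2] == 'Mid Shift':
--             mids += ppl[n]
--         else:
--             nights += ppl[n]
--     return days, mids, nights
-- ===== SOURCE B (Python) =====
-- def get_shift_type(ppl):
--     days = [x for p in ppl if p[2] == 'Days' for x in p]
--     mids = [x for p in ppl if p[2] == 'Mid Shift' for x in p]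
--     nights = [x for p in ppl if p[2] != 'Days' and p[2] != 'Mid Shift' for x in p]
--     return days, mids, nights
-- ===== Notes on version B (the rewrite author's own statement) =====
-- stated objective: idiomatic
-- what changed: Replaces the single index-based partitioning loop with three independent filter-and-flatten list comprehensions, one per shift label.
import Mathlib
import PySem

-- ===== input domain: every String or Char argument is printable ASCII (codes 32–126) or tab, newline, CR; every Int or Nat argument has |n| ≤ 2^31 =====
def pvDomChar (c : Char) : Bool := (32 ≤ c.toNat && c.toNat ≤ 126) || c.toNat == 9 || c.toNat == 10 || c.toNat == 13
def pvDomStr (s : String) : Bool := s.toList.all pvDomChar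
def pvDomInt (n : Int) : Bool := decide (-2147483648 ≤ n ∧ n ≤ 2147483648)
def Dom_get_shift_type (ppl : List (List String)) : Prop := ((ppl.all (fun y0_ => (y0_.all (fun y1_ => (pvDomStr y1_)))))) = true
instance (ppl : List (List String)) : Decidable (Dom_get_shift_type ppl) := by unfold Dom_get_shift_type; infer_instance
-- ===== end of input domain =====

-- B replaces A's single index loop by three independent filter-and-flatten comprehensions (idiomatic; return value only).

-- ===== PORT A =====
-- literal port of A: index loop over range(0, len(ppl)) with a (days, mids, nights) accumulator;
-- pyGetD defaults are unreachable under Pre_ (every row has ≥ 3 fields).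
def get_shift_type (ppl : List (List String)) : List String × List String × List String :=
  (PySem.List.pyRange 0 (ppl.length : Int) 1).foldl
    (fun acc n =>
      let row := PySem.List.pyGetD ppl n []
      if PySem.List.pyGetD row 2 "" = "Days" then (acc.1 ++ row, acc.2.1, acc.2.2)
      else if PySem.List.pyGetD row 2 "" = "Mid Shift" then (acc.1, acc.2.1 ++ row, acc.2.2)
      else (acc.1, acc.2.1, acc.2.2 ++ row))
    ([], [], [])

-- ===== PORT B =====
-- literal port of B: three comprehensions [x for p in ppl if <label test> for x in p]
def get_shift_type_alt (ppl : List (List String)) : List String × List String × List String :=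
  ((ppl.filter (fun p => PySem.List.pyGetD p 2 "" = "Days")).flatMap id,
   (ppl.filter (fun p => PySem.List.pyGetD p 2 "" = "Mid Shift")).flatMap id,
   (ppl.filter (fun p => PySem.List.pyGetD p 2 "" ≠ "Days" ∧ PySem.List.pyGetD p 2 "" ≠ "Mid Shift")).flatMap id)

-- ===== PRECONDITION & SPEC =====
-- Pre_ excludes exactly the inputs where some row has fewer than 3 fields: there ppl[n][2] raises IndexError in A (and B).
def Pre_get_shift_type (ppl : List (List String)) : Prop := ∀ p ∈ ppl, 3 ≤ p.length
instance (ppl : List (List String)) : Decidable (Pre_get_shift_type ppl) := by unfold Pre_get_shift_type; infer_instance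
def pvWitness_get_shift_type : List (List String) := [["a", "b", "Days"], ["c", "d", "Night"], ["e", "f", "Mid Shift"]]
def Spec_get_shift_type (ppl : List (List String)) (out : List String × List String × List String) : Prop := out = get_shift_type_alt ppl
instance (ppl : List (List String)) (out : List String × List String × List String) : Decidable (Spec_get_shift_type ppl out) := by unfold Spec_get_shift_type; infer_instance

-- ===== CLAIM (what is proved, stated in full; the proofs are below) =====
def Claim_equal_get_shift_type : Prop := ∀ (ppl : List (List String)), Dom_get_shift_type ppl → Pre_get_shift_type ppl → Spec_get_shift_type ppl (get_shift_type ppl)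

-- ===== LEMMAS AND PROOFS =====

-- the loop body of A's port, named for the induction
def pvStep (acc : List String × List String × List String) (row : List String) : List String × List String × List String :=
  if PySem.List.pyGetD row 2 "" = "Days" then (acc.1 ++ row, acc.2.1, acc.2.2)
  else if PySem.List.pyGetD row 2 "" = "Mid Shift" then (acc.1, acc.2.1 ++ row, acc.2.2)
  else (acc.1, acc.2.1, acc.2.2 ++ row)

theorem pvFoldl_step (ppl : List (List String)) (d m nn : List String) :
    ppl.foldl pvStep (d, m, nn) =
      (d ++ (ppl.filter (fun p => PySem.List.pyGetD p 2 "" = "Days")).flatMap id,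
       m ++ (ppl.filter (fun p => PySem.List.pyGetD p 2 "" = "Mid Shift")).flatMap id,
       nn ++ (ppl.filter (fun p => PySem.List.pyGetD p 2 "" ≠ "Days" ∧ PySem.List.pyGetD p 2 "" ≠ "Mid Shift")).flatMap id) := by
  induction ppl generalizing d m nn with
  | nil => simp
  | cons p rest ih =>
    by_cases h1 : PySem.List.pyGetD p 2 "" = "Days"
    · simp [pvStep, h1, ih]
    · by_cases h2 : PySem.List.pyGetD p 2 "" = "Mid Shift"
      · simp [pvStep, h2, ih]
      · simp [pvStep, h1, h2, ih]

-- ===== VERDICT (by name: the statement is the Claim_ definition above) =====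
theorem get_shift_type_spec : Claim_equal_get_shift_type := by
  intro ppl _ _
  unfold Spec_get_shift_type get_shift_type get_shift_type_alt
  rw [show (fun (acc : List String × List String × List String) (n : Int) =>
        let row := PySem.List.pyGetD ppl n []
        if PySem.List.pyGetD row 2 "" = "Days" then (acc.1 ++ row, acc.2.1, acc.2.2)
        else if PySem.List.pyGetD row 2 "" = "Mid Shift" then (acc.1, acc.2.1 ++ row, acc.2.2)
        else (acc.1, acc.2.1, acc.2.2 ++ row)) =
      (fun acc n => pvStep acc (PySem.List.pyGetD ppl n [])) from rfl]
  rw [PySem.List.foldl_pyRange_zero_pyGetD' ppl ([] : List String) pvStep ([], [], [])]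
  simpa using pvFoldl_step ppl [] [] []
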